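-- pv_equiv track=rewrite | github.com/ivanillera/TP1Sintaxis | different.py | a_different
-- ===== SOURCE A (Python) =====
-- TRAMPA = -1
--
-- RESULTADO_ACEPTADO = "ACEPTADO"
--
-- RESULTADO_TRAMPA = "TRAMPA"
--
-- RESULTADO_NO_ACEPTADO = "NO_ACEPTADO"
--
-- def d_different(estado_anterior, caracter):
--     if estado_anterior == 0 and caracter == "!":
--         return 1
--     if estado_anterior == 1 and caracter == "=":
--         return 2
--     return TRAMPA
--
-- def a_different(cadena):
--     Finales = [2]
--     estado_actual = 0
--
--     for caracter in cadena:
--         estado_proximo = d_different(estado_actual, caracter)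
--         if estado_proximo == TRAMPA:
--             return RESULTADO_TRAMPA
--         estado_actual = estado_proximo
--
--     if estado_actual in Finales:
--         return RESULTADO_ACEPTADO
--     else:
--         return RESULTADO_NO_ACEPTADO
-- ===== SOURCE B (Python) =====
-- TRAMPA = -1
-- RESULTADO_ACEPTADO = "ACEPTADO"
-- RESULTADO_TRAMPA = "TRAMPA"
-- RESULTADO_NO_ACEPTADO = "NO_ACEPTADO"
--
-- def a_different(cadena):
--     chars = list(cadena)
--     if chars == ["!", "="]:
--         return RESULTADO_ACEPTADO
--     elif chars == [] or chars == ["!"]: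
--         return RESULTADO_NO_ACEPTADO
--     else:
--         return RESULTADO_TRAMPA
-- ===== Notes on version B (the rewrite author's own statement) =====
-- stated objective: simpler
-- what changed: Replaces the DFA transition loop (d_different with a current-state accumulator) by one direct three-way comparison of list(cadena) against the literal accepted string and its proper prefixes.
import Mathlib
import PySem

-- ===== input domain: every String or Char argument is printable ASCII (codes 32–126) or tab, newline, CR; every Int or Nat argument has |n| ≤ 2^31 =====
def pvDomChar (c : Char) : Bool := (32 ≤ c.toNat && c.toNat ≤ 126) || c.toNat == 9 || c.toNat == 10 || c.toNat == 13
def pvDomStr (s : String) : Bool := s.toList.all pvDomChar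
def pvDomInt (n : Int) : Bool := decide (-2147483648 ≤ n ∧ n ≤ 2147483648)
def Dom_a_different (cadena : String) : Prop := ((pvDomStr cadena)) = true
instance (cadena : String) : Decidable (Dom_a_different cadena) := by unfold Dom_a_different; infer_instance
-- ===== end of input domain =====

-- B replaces the DFA loop with a direct three-way comparison of the char list
-- against '!=' and its proper prefixes (objective: simpler).

-- ===== PORT A =====
def d_different (estado_anterior : Int) (caracter : Char) : Int :=
  if estado_anterior = 0 ∧ caracter = '!' then 1
  else if estado_anterior = 1 ∧ caracter = '=' then 2
  else -1

def a_different_loop (estado_actual : Int) (cs : List Char) : String :=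
  match cs with
  | [] => if estado_actual ∈ ([2] : List Int) then "ACEPTADO" else "NO_ACEPTADO"
  | c :: rest =>
      let estado_proximo := d_different estado_actual c
      if estado_proximo = -1 then "TRAMPA"
      else a_different_loop estado_proximo rest

def a_different (cadena : String) : String :=
  a_different_loop 0 cadena.toList

-- ===== PORT B =====
def a_different_alt (cadena : String) : String :=
  let chars := cadena.toList
  if chars = ['!', '='] then "ACEPTADO"
  else if chars = [] ∨ chars = ['!'] then "NO_ACEPTADO"
  else "TRAMPA"

-- ===== PRECONDITION & SPEC =====
def Spec_a_different (cadena : String) (out : String) : Prop := out = a_different_alt cadena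
instance (cadena : String) (out : String) : Decidable (Spec_a_different cadena out) := by unfold Spec_a_different; infer_instance

-- ===== CLAIM (what is proved, stated in full; the proofs are below) =====
def Claim_equal_a_different : Prop := ∀ (cadena : String), Dom_a_different cadena → Spec_a_different cadena (a_different cadena)

-- ===== LEMMAS AND PROOFS =====
theorem a_different_loop_eq (l : List Char) :
    a_different_loop 0 l =
      (if l = ['!', '='] then "ACEPTADO"
       else if l = [] ∨ l = ['!'] then "NO_ACEPTADO"
       else "TRAMPA") := by
  rcases l with _ | ⟨c, _ | ⟨d, rest⟩⟩
  · simp [a_different_loop]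
  · by_cases hc : c = '!' <;>
      simp [a_different_loop, d_different, hc]
  · by_cases hc : c = '!'
    · by_cases hd : d = '='
      · rcases rest with _ | ⟨e, rest'⟩
        · simp [a_different_loop, d_different, hc, hd]
        · simp [a_different_loop, d_different, hc, hd]
      · simp [a_different_loop, d_different, hc, hd]
    · simp [a_different_loop, d_different, hc]

-- ===== VERDICT (by name: the statement is the Claim_ definition above) =====
theorem a_different_spec : Claim_equal_a_different := by
  intro cadena _
  unfold Spec_a_different a_different a_different_alt
  exact a_different_loop_eq cadena.toList
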